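-- pv_equiv track=rewrite | github.com/bohdanvan/advent-of-code | src/advent_of_code_2024/day11/day11.py | solve
-- ===== SOURCE A (Python) =====
-- from collections import defaultdict
-- from typing import Counter, Dict, List
--
-- def solve(list: List[int], loops: int) -> int:
--     counter: Dict[int, int] = Counter(list)
--
--     for _ in range(loops):
--         next_counter: Dict[int, int] = defaultdict(int)
--
--         for n, count in counter.items():
--             if n == 0:
--                 next_counter[1] += count
--             elif len(str(n)) % 2 == 0:
--                 s = str(n)
--                 left = int(s[0 : len(s) // 2])
--                 right = int(s[len(s) // 2 :])
--                 next_counter[left] += count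
--                 next_counter[right] += count
--             else:
--                 next_counter[n * 2024] += count
--
--             counter = next_counter
--
--     return sum(counter.values())
-- ===== SOURCE B (Python) =====
-- from typing import List
--
--
-- def _step_values(n: int) -> List[int]:
--     if n == 0:
--         return [1]
--     s = str(n)
--     if len(s) % 2 == 0:
--         return [int(s[: len(s) // 2]), int(s[len(s) // 2:])]
--     return [n * 2024]
--
--
-- def _merge(xs, ys):
--     out = []
--     i = j = 0
--     while i < len(xs) and j < len(ys):
--         if xs[i][0] <= ys[j][0]:
--             out.append(xs[i])
--             i += 1
--         else:
--             out.append(ys[j])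
--             j += 1
--     return out + xs[i:] + ys[j:]
--
--
-- def _merge_sort(pairs):
--     if len(pairs) <= 1:
--         return pairs
--     mid = len(pairs) // 2
--     return _merge(_merge_sort(pairs[:mid]), _merge_sort(pairs[mid:]))
--
--
-- def _consolidate(pairs):
--     out = []
--     i = 0
--     while i < len(pairs):
--         n = pairs[i][0]
--         total = 0
--         while i < len(pairs) and pairs[i][0] == n:
--             total += pairs[i][1]
--             i += 1
--         out.append((n, total))
--     return out
--
--
-- def solve(list: List[int], loops: int) -> int:
--     # multiset of stones kept as a stone-sorted list of (stone, count) pairs;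
--     # each blink expands every pair and re-consolidates by merge sort + run merging
--     pairs = [(n, 1) for n in list]
--     for _ in range(loops):
--         expanded = [(m, c) for (n, c) in pairs for m in _step_values(n)]
--         pairs = _consolidate(_merge_sort(expanded))
--     return sum(c for _, c in pairs)
-- ===== Notes on version B (the rewrite author's own statement) =====
-- stated objective: alternative
-- what changed: Replaces A's per-blink rebuild of a hash counter (Counter/defaultdict scatter per generation) by keeping the stone multiset as a stone-sorted list of (stone, count) pairs, re-consolidated each blink with a hand-written merge sort plus linear run merging.
-- outside the precondition, e.g. on solve([-100], 1): A returns 2, B returns 2; on solve([-5], 1): A raises ValueError, B raises ValueError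
import Mathlib
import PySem

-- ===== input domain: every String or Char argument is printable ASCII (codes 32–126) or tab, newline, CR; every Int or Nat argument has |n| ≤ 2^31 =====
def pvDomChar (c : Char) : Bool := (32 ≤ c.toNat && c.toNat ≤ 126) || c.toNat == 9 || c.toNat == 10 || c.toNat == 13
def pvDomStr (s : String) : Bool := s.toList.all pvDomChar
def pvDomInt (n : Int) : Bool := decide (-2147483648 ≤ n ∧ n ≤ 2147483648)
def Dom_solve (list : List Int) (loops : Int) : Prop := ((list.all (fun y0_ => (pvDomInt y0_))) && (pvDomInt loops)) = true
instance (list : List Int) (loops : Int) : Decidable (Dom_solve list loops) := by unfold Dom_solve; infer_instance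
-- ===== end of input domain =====

-- B keeps the stone multiset as a stone-sorted list of (stone, count) pairs rebuilt each
-- blink by hand-written merge sort + run consolidation, instead of A's hash-counter
-- rebuild (objective: alternative data structure / algorithm).


-- ===== PORT A =====
-- shared split code: BOTH Pythons contain literally `int(s[: len(s) // 2])` /
-- `int(s[len(s) // 2 :])` with s = str(n); `.getD 0` marks int()'s ValueError on an
-- even-length signed string such as "-5" — those inputs are outside Pre_solve.
def pvLeftHalf (n : Int) : Int :=
  let s := PySem.Int.toChars n
  (PySem.Int.ofChars? (PySem.List.slice s (some 0) (some (PySem.Int.floordiv (s.length : Int) 2)))).getD 0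

def pvRightHalf (n : Int) : Int :=
  let s := PySem.Int.toChars n
  (PySem.Int.ofChars? (PySem.List.slice s (some (PySem.Int.floordiv (s.length : Int) 2)) none)).getD 0

-- A: Counter(list), then `loops` passes each rebuilding a defaultdict of counts.
-- (A's `counter = next_counter` sits inside the inner loop, but the loop iterates the
-- already-created items view of the old counter, so it is the end-of-pass assignment.)
def solve (list : List Int) (loops : Int) : Int :=
  let counter : PySem.Dict Int Int := PySem.Dict.counter list
  let counter := (PySem.List.pyRange 0 loops 1).foldl (fun counter _ =>
    counter.items.foldl (fun next_counter nc =>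
      if nc.1 = 0 then
        next_counter.modify 1 0 (· + nc.2)
      else if (PySem.Int.toChars nc.1).length % 2 == 0 then
        (next_counter.modify (pvLeftHalf nc.1) 0 (· + nc.2)).modify (pvRightHalf nc.1) 0 (· + nc.2)
      else
        next_counter.modify (nc.1 * 2024) 0 (· + nc.2)) PySem.Dict.empty) counter
  counter.values.sum

-- ===== PORT B =====
-- Source B's _step_values: the successor stones of one stone after one blink
def solveAltStep (n : Int) : List Int :=
  if n = 0 then [1]
  else
    let s := PySem.Int.toChars n
    if s.length % 2 == 0 then [pvLeftHalf n, pvRightHalf n]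
    else [n * 2024]

-- Source B's _merge: the two-pointer while loop over xs[i:] / ys[j:] written as the standard
-- two-list recursion (out.append becomes cons; the trailing `out + xs[i:] + ys[j:]` are the
-- base cases); value-exact
def solveAltMerge : List (Int × Int) → List (Int × Int) → List (Int × Int)
  | [], ys => ys
  | x :: xs, [] => x :: xs
  | x :: xs, y :: ys =>
    if x.1 ≤ y.1 then x :: solveAltMerge xs (y :: ys)
    else y :: solveAltMerge (x :: xs) ys

-- Source B's _merge_sort; pairs[:mid] / pairs[mid:] are take/drop (PySem.List.slice_to_natCast /
-- slice_from_natCast: exact for the natural index mid = len // 2)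
def solveAltSort (pairs : List (Int × Int)) : List (Int × Int) :=
  if h : pairs.length ≤ 1 then pairs
  else
    let mid := pairs.length / 2
    solveAltMerge (solveAltSort (pairs.take mid)) (solveAltSort (pairs.drop mid))
termination_by pairs.length
decreasing_by
  · simpa [List.length_take] using by omega
  · simpa [List.length_drop] using by omega

-- Source B's _consolidate: the outer while loop is the recursion, the inner run-summing while
-- loop is takeWhile/dropWhile of the current stone's run; value-exact
def solveAltConsolidate : List (Int × Int) → List (Int × Int)
  | [] => []
  | p :: rest =>
    (p.1, p.2 + ((rest.takeWhile (fun q => q.1 == p.1)).map (·.2)).sum) ::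
      solveAltConsolidate (rest.dropWhile (fun q => q.1 == p.1))
termination_by l => l.length
decreasing_by
  simpa using Nat.lt_succ_of_le (List.length_dropWhile_le _ _)

def solve_alt (list : List Int) (loops : Int) : Int :=
  let pairs := list.map (fun n => (n, (1 : Int)))
  let pairs := (PySem.List.pyRange 0 loops 1).foldl (fun pairs _ =>
    solveAltConsolidate (solveAltSort
      (pairs.flatMap (fun p => (solveAltStep p.1).map (fun m => (m, p.2)))))) pairs
  (pairs.map (·.2)).sum

-- ===== PRECONDITION & SPEC =====
-- Pre_ excludes lists holding a negative stone when loops > 0: there A (and B alike)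
-- raises ValueError as soon as a reached stone's signed decimal string has even length
-- (int("-") / int("-5…")); the exact raising set is not a closed-form input condition, so
-- all negative stones with loops > 0 are excluded, including the few inputs (e.g. [-100]
-- with loops = 1) on which A happens to return — B returns the same value there too.
def Pre_solve (list : List Int) (loops : Int) : Prop :=
  loops ≤ 0 ∨ ∀ n ∈ list, 0 ≤ n
instance (list : List Int) (loops : Int) : Decidable (Pre_solve list loops) := by
  unfold Pre_solve; infer_instance

def pvWitness_solve : List Int × Int := ([125, 17], 6)

def Spec_solve (list : List Int) (loops : Int) (out : Int) : Prop := out = solve_alt list loops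
instance (list : List Int) (loops : Int) (out : Int) : Decidable (Spec_solve list loops out) := by
  unfold Spec_solve; infer_instance

-- ===== CLAIM (what is proved, stated in full; the proofs are below) =====
def Claim_equal_solve : Prop := ∀ (list : List Int) (loops : Int), Dom_solve list loops → Pre_solve list loops → Spec_solve list loops (solve list loops)

-- ===== LEMMAS AND PROOFS =====

-- pure per-stone count: number of stones n becomes after s blinks
def pvPc : Nat → Int → Int
  | 0, _ => 1
  | s + 1, n => ((solveAltStep n).map (pvPc s)).sum

-- weighted sum of a counter dict against pvPc s
def pvW (d : PySem.Dict Int Int) (s : Nat) : Int :=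
  (d.items.map (fun p => p.2 * pvPc s p.1)).sum

theorem sum_map_replace (l : List (Int × Int)) (k v w : Int) (g : Int → Int)
    (hnd : (l.map Prod.fst).Nodup) (hmem : (k, v) ∈ l) :
    ((l.map (fun p => if (p.1 == k) = true then (k, w) else p)).map (fun p => p.2 * g p.1)).sum
      = (l.map (fun p => p.2 * g p.1)).sum + (w - v) * g k := by
  induction l with
  | nil => simp at hmem
  | cons p t ih =>
    simp only [List.map_cons, List.nodup_cons] at hnd ⊢
    by_cases hk : p.1 = k
    · have hp : p = (k, v) := by
        rcases List.mem_cons.mp hmem with h | h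
        · rw [h]
        · exact absurd (hk ▸ List.mem_map_of_mem h) hnd.1
      have ht : ∀ q ∈ t, ((fun p => if (p.1 == k) = true then (k, w) else p) q) = q := by
        intro q hq
        have : q.1 ≠ k := fun hqk => hnd.1 (by rw [hk]; exact hqk ▸ List.mem_map_of_mem hq)
        simp [this]
      rw [List.map_congr_left ht, hp]
      simp [List.sum_cons]
      ring
    · have hm : (k, v) ∈ t := by
        rcases List.mem_cons.mp hmem with h | h
        · exact absurd (congrArg Prod.fst h).symm hk
        · exact h
      have hne : (p.1 == k) = false := beq_eq_false_iff_ne.mpr hk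
      simp only [hne, Bool.false_eq_true, if_false, List.sum_cons, ih hnd.2 hm]
      ring

theorem pvW_modify (d : PySem.Dict Int Int) (hnd : d.keys.Nodup) (k c : Int) (s : Nat) :
    pvW (d.modify k 0 (· + c)) s = pvW d s + c * pvPc s k := by
  show pvW (d.insert k (d.getD k 0 + c)) s = _
  by_cases hc : d.contains k = true
  · obtain ⟨v, hv⟩ : ∃ v, d.get? k = some v := by
      rw [PySem.Dict.contains_eq_isSome_get?] at hc
      exact Option.isSome_iff_exists.mp hc
    have hmem := PySem.Dict.mem_items_of_get?_eq_some d hv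
    have hgd := PySem.Dict.getD_of_get?_eq_some d 0 hv
    unfold pvW
    rw [PySem.Dict.items_insert_of_contains d _ hc, hgd,
      sum_map_replace d.items k v (v + c) (pvPc s) hnd hmem]
    ring
  · have hc' : d.contains k = false := by simpa using hc
    unfold pvW
    rw [PySem.Dict.items_insert_of_not_contains d _ hc',
      PySem.Dict.getD_of_not_contains d 0 hc']
    simp [List.sum_append]

theorem pv_nodup_keys_modify (d : PySem.Dict Int Int) (hnd : d.keys.Nodup) (k c : Int) :
    (d.modify k 0 (· + c)).keys.Nodup := by
  rw [PySem.Dict.keys_modify]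
  exact PySem.Dict.nodup_keys_insert d k _ hnd

theorem pvW_modify_fold (ms : List Int) (c : Int) (d : PySem.Dict Int Int)
    (hnd : d.keys.Nodup) (s : Nat) :
    pvW (ms.foldl (fun d m => d.modify m 0 (· + c)) d) s
      = pvW d s + c * (ms.map (pvPc s)).sum ∧
    (ms.foldl (fun d m => d.modify m 0 (· + c)) d).keys.Nodup := by
  induction ms generalizing d with
  | nil => exact ⟨by simp, hnd⟩
  | cons m t ih =>
    obtain ⟨h1, h2⟩ := ih (d.modify m 0 (· + c)) (pv_nodup_keys_modify d hnd m c)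
    refine ⟨?_, h2⟩
    simp only [List.foldl_cons, h1, pvW_modify d hnd m c s, List.map_cons, List.sum_cons]
    ring

-- A's inner-loop body on one item is the fold of single-key additions over solveAltStep
theorem pv_bodyA_eq (next : PySem.Dict Int Int) (nc : Int × Int) :
    (if nc.1 = 0 then
        next.modify 1 0 (· + nc.2)
      else if (PySem.Int.toChars nc.1).length % 2 == 0 then
        (next.modify (pvLeftHalf nc.1) 0 (· + nc.2)).modify (pvRightHalf nc.1) 0 (· + nc.2)
      else
        next.modify (nc.1 * 2024) 0 (· + nc.2))
      = (solveAltStep nc.1).foldl (fun d m => d.modify m 0 (· + nc.2)) next := by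
  unfold solveAltStep
  split_ifs <;> simp_all [List.foldl]

-- one pass of A (the inner for-loop) lowers the blink index of the weighted sum
theorem pv_pass_W (l : List (Int × Int)) (next : PySem.Dict Int Int)
    (hnd : next.keys.Nodup) (s : Nat) :
    pvW (l.foldl (fun next_counter nc =>
        if nc.1 = 0 then
          next_counter.modify 1 0 (· + nc.2)
        else if (PySem.Int.toChars nc.1).length % 2 == 0 then
          (next_counter.modify (pvLeftHalf nc.1) 0 (· + nc.2)).modify (pvRightHalf nc.1) 0 (· + nc.2)
        else
          next_counter.modify (nc.1 * 2024) 0 (· + nc.2)) next) s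
      = pvW next s + (l.map (fun p => p.2 * pvPc (s + 1) p.1)).sum ∧
    (l.foldl (fun next_counter nc =>
        if nc.1 = 0 then
          next_counter.modify 1 0 (· + nc.2)
        else if (PySem.Int.toChars nc.1).length % 2 == 0 then
          (next_counter.modify (pvLeftHalf nc.1) 0 (· + nc.2)).modify (pvRightHalf nc.1) 0 (· + nc.2)
        else
          next_counter.modify (nc.1 * 2024) 0 (· + nc.2)) next).keys.Nodup := by
  induction l generalizing next with
  | nil => exact ⟨by simp, hnd⟩
  | cons nc t ih =>
    rw [List.foldl_cons, pv_bodyA_eq next nc]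
    obtain ⟨hf, hn⟩ := pvW_modify_fold (solveAltStep nc.1) nc.2 next hnd s
    obtain ⟨h1, h2⟩ := ih _ hn
    refine ⟨?_, h2⟩
    rw [h1, hf]
    have : pvPc (s + 1) nc.1 = ((solveAltStep nc.1).map (pvPc s)).sum := rfl
    simp only [List.map_cons, List.sum_cons, this]
    ring

-- the outer for-loop: k passes turn pvW · 0 into pvW of the start at index k
theorem pv_loop_W (l : List Int) (d : PySem.Dict Int Int) (hnd : d.keys.Nodup) :
    pvW (l.foldl (fun counter _ =>
        counter.items.foldl (fun next_counter nc =>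
          if nc.1 = 0 then
            next_counter.modify 1 0 (· + nc.2)
          else if (PySem.Int.toChars nc.1).length % 2 == 0 then
            (next_counter.modify (pvLeftHalf nc.1) 0 (· + nc.2)).modify (pvRightHalf nc.1) 0 (· + nc.2)
          else
            next_counter.modify (nc.1 * 2024) 0 (· + nc.2)) PySem.Dict.empty) d) 0
      = pvW d l.length := by
  induction l generalizing d with
  | nil => simp
  | cons x t ih =>
    simp only [List.foldl_cons, List.length_cons]
    obtain ⟨h1, h2⟩ := pv_pass_W d.items PySem.Dict.empty PySem.Dict.nodup_keys_empty t.length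
    rw [ih _ h2, h1]
    simp [pvW, PySem.Dict.empty]

theorem solve_eq_sum (list : List Int) (loops : Int) :
    solve list loops = (list.map (pvPc loops.toNat)).sum := by
  unfold solve
  have hnd : (PySem.Dict.counter list).keys.Nodup := PySem.Dict.nodup_keys_counter list
  have hlen : (PySem.List.pyRange 0 loops 1).length = loops.toNat := by
    simp only [PySem.List.length_pyRange_one, sub_zero]
  have hsum : ∀ s : Nat, pvW (PySem.Dict.counter list) s = (list.map (pvPc s)).sum := by
    intro s
    rw [PySem.Dict.counter_eq_foldl]
    have := (pvW_modify_fold list 1 PySem.Dict.empty PySem.Dict.nodup_keys_empty s).1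
    simpa [pvW, PySem.Dict.empty] using this
  have hv : ∀ d : PySem.Dict Int Int, d.values.sum = pvW d 0 := by
    intro d
    show (d.items.map Prod.snd).sum = _
    simp [pvW, pvPc]
  rw [hv, pv_loop_W _ _ hnd, hlen, hsum]

def pvV (l : List (Int × Int)) (s : Nat) : Int :=
  (l.map (fun p => p.2 * pvPc s p.1)).sum

theorem pvV_merge (xs ys : List (Int × Int)) (s : Nat) :
    pvV (solveAltMerge xs ys) s = pvV xs s + pvV ys s := by
  fun_induction solveAltMerge xs ys with
  | case1 ys => simp [pvV]
  | case2 x xs => simp [pvV]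
  | case3 x xs y ys hle ih => simp only [pvV, List.map_cons, List.sum_cons] at ih ⊢; rw [ih]; ring
  | case4 x xs y ys hle ih => simp only [pvV, List.map_cons, List.sum_cons] at ih ⊢; rw [ih]; ring

theorem pvV_append (xs ys : List (Int × Int)) (s : Nat) :
    pvV (xs ++ ys) s = pvV xs s + pvV ys s := by
  simp [pvV]

theorem pvV_sort (pairs : List (Int × Int)) (s : Nat) :
    pvV (solveAltSort pairs) s = pvV pairs s := by
  fun_induction solveAltSort pairs with
  | case1 pairs h => rfl
  | case2 pairs h mid ih1 ih2 =>
    rw [pvV_merge, ih1, ih2, ← pvV_append, List.take_append_drop]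

theorem pvV_of_const_key (l : List (Int × Int)) (n : Int) (s : Nat)
    (h : ∀ p ∈ l, p.1 = n) :
    pvV l s = (l.map (·.2)).sum * pvPc s n := by
  induction l with
  | nil => simp [pvV]
  | cons p t ih =>
    have hp : p.1 = n := h p (List.mem_cons_self ..)
    simp only [pvV, List.map_cons, List.sum_cons] at ih ⊢
    rw [ih (fun q hq => h q (List.mem_cons_of_mem p hq)), hp]
    ring

theorem pvV_consolidate (l : List (Int × Int)) (s : Nat) :
    pvV (solveAltConsolidate l) s = pvV l s := by
  fun_induction solveAltConsolidate l with
  | case1 => rfl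
  | case2 p rest ih =>
    have hconst : ∀ q ∈ rest.takeWhile (fun q => q.1 == p.1), q.1 = p.1 := by
      intro q hq
      simpa using List.mem_takeWhile_imp hq
    have hL : pvV ((p.1, p.2 + ((rest.takeWhile (fun q => q.1 == p.1)).map (·.2)).sum) ::
        solveAltConsolidate (rest.dropWhile (fun q => q.1 == p.1))) s
        = (p.2 + ((rest.takeWhile (fun q => q.1 == p.1)).map (·.2)).sum) * pvPc s p.1
          + pvV (solveAltConsolidate (rest.dropWhile (fun q => q.1 == p.1))) s := by
      simp [pvV]
    have hR : pvV rest s = pvV (rest.takeWhile (fun q => q.1 == p.1)) s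
        + pvV (rest.dropWhile (fun q => q.1 == p.1)) s := by
      conv_lhs => rw [← List.takeWhile_append_dropWhile (p := fun q => q.1 == p.1) (l := rest)]
      rw [pvV_append]
    have h0 : pvV (p :: rest) s = p.2 * pvPc s p.1 + pvV rest s := by simp [pvV]
    rw [hL, ih, h0, hR, pvV_of_const_key _ p.1 s hconst]
    ring

theorem pvV_expand (l : List (Int × Int)) (s : Nat) :
    pvV (l.flatMap (fun p => (solveAltStep p.1).map (fun m => (m, p.2)))) s = pvV l (s + 1) := by
  induction l with
  | nil => rfl
  | cons p t ih =>
    rw [List.flatMap_cons, pvV_append, ih]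
    simp only [pvV, List.map_cons, List.sum_cons, List.map_map]
    have : pvPc (s + 1) p.1 = ((solveAltStep p.1).map (pvPc s)).sum := rfl
    rw [this]
    simp [Function.comp_def, mul_comm p.2, ← List.sum_map_mul_right]

theorem pv_loopB (l : List Int) (pairs : List (Int × Int)) :
    pvV (l.foldl (fun pairs _ =>
      solveAltConsolidate (solveAltSort
        (pairs.flatMap (fun p => (solveAltStep p.1).map (fun m => (m, p.2)))))) pairs) 0
      = pvV pairs l.length := by
  induction l generalizing pairs with
  | nil => rfl
  | cons x t ih =>
    rw [List.foldl_cons, ih, pvV_consolidate, pvV_sort, pvV_expand, List.length_cons]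

theorem solve_alt_eq_sum (list : List Int) (loops : Int) :
    solve_alt list loops = (list.map (pvPc loops.toNat)).sum := by
  unfold solve_alt
  have hlen : (PySem.List.pyRange 0 loops 1).length = loops.toNat := by
    simp only [PySem.List.length_pyRange_one, sub_zero]
  have hfin : ∀ l : List (Int × Int), (l.map (·.2)).sum = pvV l 0 := by
    intro l
    simp [pvV, pvPc]
  rw [hfin, pv_loopB, hlen]
  simp [pvV, List.map_map, Function.comp_def]

-- ===== VERDICT (by name: the statement is the Claim_ definition above) =====
theorem solve_spec : Claim_equal_solve := by
  intro list loops _ _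
  unfold Spec_solve
  rw [solve_eq_sum, solve_alt_eq_sum]
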